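-- pv_equiv track=rewrite | github.com/alexgiorev/hack-bulgaria-py101-2019 | week2/matrix_bombing.py | bomb
-- ===== SOURCE A (Python) =====
-- import copy
--
-- def get_neighbours(bri, bci, nrows, ncols):
--     # returns an iterator which yields all neighbours of (bri, bci)
--     # for a matrix with @nrows rows and @ncols columns
--     def is_good(coords):
--         r, c = coords
--         return 0 <= r < nrows and 0 <= c < ncols
--
--     suggestion = ((bri-1, bci-1), (bri-1, bci), (bri-1, bci+1),
--                   (bri, bci-1), (bri, bci+1),
--                   (bri+1, bci-1), (bri+1, bci), (bri+1, bci+1))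
--
--     return filter(is_good, suggestion)
--
-- def bomb(m, bri, bci):
--     # returns a new matrix that is the result of
--     # bombing m at the coordinates (ri, ci)
--     out = copy.deepcopy(m)
--     nrows = len(m)
--     ncols = len(m[0])
--     val = m[bri][bci]
--     for ri, ci in get_neighbours(bri, bci, nrows, ncols):
--         nval = out[ri][ci]
--         out[ri][ci] = max(0, nval - val)
--     return out
-- ===== SOURCE B (Python) =====
-- def bomb(m, bri, bci):
--     # one-pass nested comprehension: compute each cell conditionally instead of
--     # deepcopy-then-mutate; never mutates m
--     ncols = len(m[0])
--     val = m[bri][bci]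
--     return [[max(0, x - val)
--              if (c < ncols and abs(r - bri) <= 1 and abs(c - bci) <= 1
--                  and not (r == bri and c == bci))
--              else x
--              for c, x in enumerate(row)]
--             for r, row in enumerate(m)]
-- ===== Notes on version B (the rewrite author's own statement) =====
-- stated objective: simpler
-- what changed: B replaces A's deepcopy-then-mutate-the-eight-neighbours (explicit loop over a filtered candidate list, in-place updates) with a single nested list comprehension that recomputes every cell conditionally from its coordinates, never mutating anything.
import Mathlib
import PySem

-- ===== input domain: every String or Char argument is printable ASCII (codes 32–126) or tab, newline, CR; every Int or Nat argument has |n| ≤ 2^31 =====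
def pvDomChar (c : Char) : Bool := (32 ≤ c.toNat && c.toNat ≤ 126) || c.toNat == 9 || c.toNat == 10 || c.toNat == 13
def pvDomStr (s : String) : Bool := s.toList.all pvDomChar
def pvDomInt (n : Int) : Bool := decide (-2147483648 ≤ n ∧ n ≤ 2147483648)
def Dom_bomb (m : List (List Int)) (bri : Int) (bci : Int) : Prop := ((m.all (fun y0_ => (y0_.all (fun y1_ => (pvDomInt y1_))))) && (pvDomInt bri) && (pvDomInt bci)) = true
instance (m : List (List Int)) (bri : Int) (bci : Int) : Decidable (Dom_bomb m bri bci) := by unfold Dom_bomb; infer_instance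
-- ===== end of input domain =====

-- B replaces A's deepcopy-then-mutate-the-neighbours with one nested comprehension that
-- computes every cell conditionally (objective: simpler; B also never mutates m).

-- ===== PORT A =====
def pvIsGood (nrows ncols : Int) (p : Int × Int) : Bool :=
  decide (0 ≤ p.1 ∧ p.1 < nrows) && decide (0 ≤ p.2 ∧ p.2 < ncols)

def pvNeighbours (bri bci nrows ncols : Int) : List (Int × Int) :=
  ([(bri-1, bci-1), (bri-1, bci), (bri-1, bci+1),
    (bri, bci-1), (bri, bci+1),
    (bri+1, bci-1), (bri+1, bci), (bri+1, bci+1)]).filter (pvIsGood nrows ncols)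

-- one iteration of A's for-loop: out[ri][ci] = max(0, out[ri][ci] - val);
-- the `none` branches are Python's IndexError (excluded by Pre_bomb)
def pvBombStep (val : Int) (out : List (List Int)) (p : Int × Int) : List (List Int) :=
  match PySem.List.pyGet? out p.1 with
  | none => out
  | some row =>
    match PySem.List.pyGet? row p.2 with
    | none => out
    | some nval => out.set p.1.toNat (row.set p.2.toNat (max 0 (nval - val)))

def bomb (m : List (List Int)) (bri : Int) (bci : Int) : List (List Int) :=
  let out := m                                                  -- copy.deepcopy(m): same values
  let nrows : Int := m.length
  let ncols : Int := ((PySem.List.pyGet? m 0).getD []).length   -- len(m[0]); empty m excluded by Pre_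
  let val : Int := (PySem.List.pyGet? ((PySem.List.pyGet? m bri).getD []) bci).getD 0  -- m[bri][bci]
  (pvNeighbours bri bci nrows ncols).foldl (pvBombStep val) out

-- ===== PORT B =====
def bomb_alt (m : List (List Int)) (bri : Int) (bci : Int) : List (List Int) :=
  let ncols : Int := ((PySem.List.pyGet? m 0).getD []).length   -- len(m[0])
  let val : Int := (PySem.List.pyGet? ((PySem.List.pyGet? m bri).getD []) bci).getD 0  -- m[bri][bci]
  (PySem.List.enumerate m).map (fun rrow =>
    (PySem.List.enumerate rrow.2).map (fun cx =>
      if cx.1 < ncols ∧ |rrow.1 - bri| ≤ 1 ∧ |cx.1 - bci| ≤ 1 ∧ ¬(rrow.1 = bri ∧ cx.1 = bci)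
      then max 0 (cx.2 - val) else cx.2))

-- ===== PRECONDITION & SPEC =====
-- Pre_bomb = exactly the inputs on which A returns: m nonempty, m[bri][bci] indexable
-- (Python semantics, negative indices allowed), and every bombed neighbour cell
-- (r,c) with 0 ≤ r < len(m), 0 ≤ c < len(m[0]) actually exists in its (possibly ragged) row.
def Pre_bomb (m : List (List Int)) (bri : Int) (bci : Int) : Prop :=
  m ≠ [] ∧
  (PySem.List.pyGet? ((PySem.List.pyGet? m bri).getD []) bci).isSome = true ∧
  (PySem.List.pyGet? m bri).isSome = true ∧
  (∀ i : Fin m.length, ∀ j : Fin m.headI.length,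
    |(i.val : Int) - bri| ≤ 1 → |(j.val : Int) - bci| ≤ 1 → ¬((i.val : Int) = bri ∧ (j.val : Int) = bci) →
    j.val < (m.getD i.val []).length)
instance (m : List (List Int)) (bri : Int) (bci : Int) : Decidable (Pre_bomb m bri bci) := by
  unfold Pre_bomb; infer_instance

def pvWitness_bomb : List (List Int) × Int × Int := ([[1, 2], [3, 4]], 0, 1)

def Spec_bomb (m : List (List Int)) (bri : Int) (bci : Int) (out : List (List Int)) : Prop := out = bomb_alt m bri bci
instance (m : List (List Int)) (bri : Int) (bci : Int) (out : List (List Int)) : Decidable (Spec_bomb m bri bci out) := by unfold Spec_bomb; infer_instance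

-- ===== CLAIM (what is proved, stated in full; the proofs are below) =====
def Claim_equal_bomb : Prop := ∀ (m : List (List Int)) (bri : Int) (bci : Int), Dom_bomb m bri bci → Pre_bomb m bri bci → Spec_bomb m bri bci (bomb m bri bci)
-- ===== LEMMAS AND PROOFS =====

lemma pvBombStep_eq (val : Int) (out : List (List Int)) (p : Int × Int)
    (h1 : 0 ≤ p.1) (h2 : p.1.toNat < out.length) (h3 : 0 ≤ p.2)
    (h4 : p.2.toNat < (out.getD p.1.toNat []).length) :
    pvBombStep val out p =
      out.set p.1.toNat ((out.getD p.1.toNat []).set p.2.toNat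
        (max 0 ((out.getD p.1.toNat []).getD p.2.toNat 0 - val))) := by
  have e1 : PySem.List.pyGet? out p.1 = some (out.getD p.1.toNat []) := by
    rw [PySem.List.pyGet?_of_nonneg out h1, List.getElem?_eq_getElem h2,
      List.getD_eq_getElem _ _ h2]
  have h4' : p.2.toNat < (out.getD p.1.toNat []).length := h4
  have e2 : PySem.List.pyGet? (out.getD p.1.toNat []) p.2 =
      some ((out.getD p.1.toNat []).getD p.2.toNat 0) := by
    rw [PySem.List.pyGet?_of_nonneg (out.getD p.1.toNat []) h3, List.getElem?_eq_getElem h4',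
      List.getD_eq_getElem _ _ h4']
  unfold pvBombStep
  rw [e1]
  dsimp only
  rw [e2]

lemma setCell_row_length (out : List (List Int)) (r c : Nat) (v : Int) (i : Nat) :
    ((out.set r ((out.getD r []).set c v)).getD i []).length = (out.getD i []).length := by
  unfold List.getD
  rw [List.getElem?_set]
  by_cases hir : r = i
  · subst hir
    by_cases hr : r < out.length
    · simp [hr]
    · simp [hr]
  · simp [hir]

lemma setCell_cell (out : List (List Int)) (r c : Nat) (v : Int)
    (hr : r < out.length) (i j : Nat) :
    ((out.set r ((out.getD r []).set c v)).getD i []).getD j 0 =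
      if i = r ∧ j = c ∧ c < (out.getD r []).length then v
      else (out.getD i []).getD j 0 := by
  unfold List.getD
  rw [List.getElem?_set]
  by_cases hir : r = i
  · subst hir
    rw [if_pos rfl, if_pos hr]
    simp only [Option.getD_some]
    rw [List.getElem?_set]
    by_cases hcj : c = j
    · subst hcj
      by_cases hcl : c < (out[r]?.getD []).length
      · simp [hcl]
      · simp [hcl]
    · rw [if_neg hcj, if_neg (by exact fun h => hcj h.2.1.symm)]
  · rw [if_neg hir]
    rw [if_neg (by exact fun h => hir (h.1.symm))]

lemma foldl_bombStep_spec (val : Int) (L : List (Int × Int)) :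
    ∀ (out : List (List Int)), L.Nodup →
    (∀ p ∈ L, 0 ≤ p.1 ∧ p.1.toNat < out.length ∧ 0 ≤ p.2 ∧
        p.2.toNat < (out.getD p.1.toNat []).length) →
    ((L.foldl (pvBombStep val) out).length = out.length ∧
     (∀ i : Nat, ((L.foldl (pvBombStep val) out).getD i []).length = (out.getD i []).length) ∧
     (∀ i j : Nat, ((L.foldl (pvBombStep val) out).getD i []).getD j 0 =
        if ((i : Int), (j : Int)) ∈ L then max 0 ((out.getD i []).getD j 0 - val)
        else (out.getD i []).getD j 0)) := by
  induction L with
  | nil => intro out _ _; simp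
  | cons p L ih =>
    intro out hnd hb
    obtain ⟨hp1, hp2, hp3, hp4⟩ := hb p (List.mem_cons_self)
    have hstep : pvBombStep val out p =
        out.set p.1.toNat ((out.getD p.1.toNat []).set p.2.toNat
          (max 0 ((out.getD p.1.toNat []).getD p.2.toNat 0 - val))) :=
      pvBombStep_eq val out p hp1 hp2 hp3 hp4
    have hlen : (pvBombStep val out p).length = out.length := by rw [hstep]; simp
    have hrow : ∀ i, ((pvBombStep val out p).getD i []).length = (out.getD i []).length := by
      intro i; rw [hstep]; exact setCell_row_length out _ _ _ i
    have hb' : ∀ q ∈ L, 0 ≤ q.1 ∧ q.1.toNat < (pvBombStep val out p).length ∧ 0 ≤ q.2 ∧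
        q.2.toNat < ((pvBombStep val out p).getD q.1.toNat []).length := by
      intro q hq
      obtain ⟨a, b, c, d⟩ := hb q (List.mem_cons_of_mem _ hq)
      exact ⟨a, by rw [hlen]; exact b, c, by rw [hrow]; exact d⟩
    obtain ⟨ih1, ih2, ih3⟩ := ih (pvBombStep val out p) (List.Nodup.of_cons hnd) hb'
    have hpnot : p ∉ L := (List.nodup_cons.mp hnd).1
    have hcell : ∀ i j : Nat, ((pvBombStep val out p).getD i []).getD j 0 =
        if i = p.1.toNat ∧ j = p.2.toNat ∧ p.2.toNat < (out.getD p.1.toNat []).length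
        then max 0 ((out.getD p.1.toNat []).getD p.2.toNat 0 - val)
        else (out.getD i []).getD j 0 := by
      intro i j; rw [hstep]; exact setCell_cell out _ _ _ hp2 i j
    refine ⟨by rw [List.foldl_cons, ih1, hlen], ?_, ?_⟩
    · intro i; rw [List.foldl_cons, ih2 i, hrow i]
    · intro i j
      rw [List.foldl_cons, ih3 i j]
      by_cases hm : ((i : Int), (j : Int)) = p
      · have hiL : ((i : Int), (j : Int)) ∉ L := by rw [hm]; exact hpnot
        have hi : i = p.1.toNat := by
          have := congrArg Prod.fst hm; dsimp at this; omega
        have hj : j = p.2.toNat := by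
          have := congrArg Prod.snd hm; dsimp at this; omega
        rw [if_neg hiL, hcell i j, if_pos ⟨hi, hj, hp4⟩, if_pos (by simp [hm]),
          hi, hj]
      · have hnotc : ¬ (i = p.1.toNat ∧ j = p.2.toNat ∧
            p.2.toNat < (out.getD p.1.toNat []).length) := by
          rintro ⟨hi, hj, -⟩
          apply hm
          have : p = ((p.1.toNat : Int), (p.2.toNat : Int)) := by
            ext <;> simp <;> omega
          rw [this, hi, hj]
        have hmem : (((i : Int), (j : Int)) ∈ p :: L) ↔ (((i : Int), (j : Int)) ∈ L) := by
          simp [hm]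
        rw [hcell i j, if_neg hnotc]
        by_cases hL : ((i : Int), (j : Int)) ∈ L
        · rw [if_pos hL, if_pos (hmem.mpr hL)]
        · rw [if_neg hL, if_neg (fun h => hL (hmem.mp h))]

lemma mem_pvNeighbours (bri bci nrows ncols r c : Int) :
    ((r, c) ∈ pvNeighbours bri bci nrows ncols) ↔
      (0 ≤ r ∧ r < nrows ∧ 0 ≤ c ∧ c < ncols ∧ |r - bri| ≤ 1 ∧ |c - bci| ≤ 1 ∧
        ¬(r = bri ∧ c = bci)) := by
  simp [pvNeighbours, pvIsGood, List.mem_filter, Prod.ext_iff, abs_le]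
  omega

lemma nodup_pvNeighbours (bri bci nrows ncols : Int) :
    (pvNeighbours bri bci nrows ncols).Nodup := by
  apply List.Nodup.filter
  simp [Prod.ext_iff]
  omega

lemma ext_cells (xs ys : List (List Int))
    (hlen : xs.length = ys.length)
    (hrow : ∀ i : Nat, i < xs.length → (xs.getD i []).length = (ys.getD i []).length)
    (hcell : ∀ i j : Nat, i < xs.length → j < (xs.getD i []).length →
      (xs.getD i []).getD j 0 = (ys.getD i []).getD j 0) : xs = ys := by
  apply List.ext_getElem?
  intro i
  by_cases hi : i < xs.length
  · rw [List.getElem?_eq_getElem hi, List.getElem?_eq_getElem (by omega : i < ys.length)]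
    have hx : xs[i] = xs.getD i [] := (List.getD_eq_getElem xs [] hi).symm
    have hy : ys[i] = ys.getD i [] := (List.getD_eq_getElem ys [] (by omega)).symm
    rw [hx, hy]
    refine congrArg some (List.ext_getElem? fun j => ?_)
    by_cases hj : j < (xs.getD i []).length
    · rw [List.getElem?_eq_getElem hj, List.getElem?_eq_getElem (by rw [← hrow i hi]; exact hj)]
      rw [← List.getD_eq_getElem (xs.getD i []) 0 hj,
        ← List.getD_eq_getElem (ys.getD i []) 0 (by rw [← hrow i hi]; exact hj)]
      exact congrArg some (hcell i j hi hj)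
    · rw [List.getElem?_eq_none_iff.mpr (by omega),
        List.getElem?_eq_none_iff.mpr (by rw [← hrow i hi]; omega)]
  · rw [List.getElem?_eq_none_iff.mpr (by omega),
      List.getElem?_eq_none_iff.mpr (by omega)]

lemma bomb_alt_length (m : List (List Int)) (bri bci : Int) :
    (bomb_alt m bri bci).length = m.length := by
  unfold bomb_alt
  simp [PySem.List.length_enumerate]

lemma bomb_alt_row_length (m : List (List Int)) (bri bci : Int) (i : Nat) :
    ((bomb_alt m bri bci).getD i []).length = (m.getD i []).length := by
  unfold bomb_alt List.getD
  rw [List.getElem?_map, PySem.List.getElem?_enumerate]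
  by_cases hi : i < m.length
  · rw [List.getElem?_eq_getElem hi]
    simp [PySem.List.length_enumerate]
  · rw [List.getElem?_eq_none_iff.mpr (by omega)]
    simp

lemma bomb_alt_cell (m : List (List Int)) (bri bci : Int) (i j : Nat)
    (hi : i < m.length) (hj : j < (m.getD i []).length) :
    ((bomb_alt m bri bci).getD i []).getD j 0 =
      if ((j : Int) < (((PySem.List.pyGet? m 0).getD []).length : Int) ∧
          |(i : Int) - bri| ≤ 1 ∧ |(j : Int) - bci| ≤ 1 ∧
          ¬((i : Int) = bri ∧ (j : Int) = bci))
      then max 0 ((m.getD i []).getD j 0 -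
        (PySem.List.pyGet? ((PySem.List.pyGet? m bri).getD []) bci).getD 0)
      else (m.getD i []).getD j 0 := by
  have hj' : j < m[i].length := by rw [← List.getD_eq_getElem m [] hi]; exact hj
  unfold bomb_alt List.getD
  rw [List.getElem?_map, PySem.List.getElem?_enumerate, List.getElem?_eq_getElem hi]
  simp only [Option.map_some, Option.getD_some]
  rw [List.getElem?_map, PySem.List.getElem?_enumerate, List.getElem?_eq_getElem hj']
  simp only [Option.map_some, Option.getD_some, zero_add]

-- ===== VERDICT (by name: the statement is the Claim_ definition above) =====
theorem bomb_spec : Claim_equal_bomb := by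
  intro m bri bci _ hpre
  obtain ⟨hne, hval, hrowS, hring⟩ := hpre
  unfold Spec_bomb
  show bomb m bri bci = bomb_alt m bri bci
  have hnc : ((PySem.List.pyGet? m 0).getD []).length = m.headI.length := by
    cases m with
    | nil => exact absurd rfl hne
    | cons a l => simp
  have hbomb : bomb m bri bci =
      (pvNeighbours bri bci (m.length : Int)
        ((((PySem.List.pyGet? m 0).getD []).length : Nat) : Int)).foldl
        (pvBombStep ((PySem.List.pyGet? ((PySem.List.pyGet? m bri).getD []) bci).getD 0)) m := rfl
  have HB : ∀ p ∈ pvNeighbours bri bci (m.length : Int)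
      ((((PySem.List.pyGet? m 0).getD []).length : Nat) : Int),
      0 ≤ p.1 ∧ p.1.toNat < m.length ∧ 0 ≤ p.2 ∧
        p.2.toNat < (m.getD p.1.toNat []).length := by
    rintro ⟨r, c⟩ hp
    rw [mem_pvNeighbours] at hp
    obtain ⟨h1, h2, h3, h4, h5, h6, h7⟩ := hp
    rw [hnc] at h4
    have hjlt : c.toNat < m.headI.length := by omega
    have hcast_r : ((r.toNat : Int)) = r := by omega
    have hcast_c : ((c.toNat : Int)) = c := by omega
    refine ⟨h1, by omega, h3, ?_⟩
    exact hring ⟨r.toNat, by omega⟩ ⟨c.toNat, hjlt⟩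
      (by simpa [hcast_r] using h5) (by simpa [hcast_c] using h6)
      (by simp only [hcast_r, hcast_c]; exact h7)
  obtain ⟨A1, A2, A3⟩ := foldl_bombStep_spec
    ((PySem.List.pyGet? ((PySem.List.pyGet? m bri).getD []) bci).getD 0)
    (pvNeighbours bri bci (m.length : Int)
      ((((PySem.List.pyGet? m 0).getD []).length : Nat) : Int)) m
    (nodup_pvNeighbours _ _ _ _) HB
  rw [hbomb]
  apply ext_cells
  · rw [A1, bomb_alt_length]
  · intro i hi
    rw [A2 i, bomb_alt_row_length]
  · intro i j hi hj
    rw [A1] at hi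
    rw [A2 i] at hj
    rw [A3 i j, bomb_alt_cell m bri bci i j hi hj]
    have hiff : (((i : Int), (j : Int)) ∈ pvNeighbours bri bci (m.length : Int)
        ((((PySem.List.pyGet? m 0).getD []).length : Nat) : Int)) ↔
        ((j : Int) < (((PySem.List.pyGet? m 0).getD []).length : Int) ∧
          |(i : Int) - bri| ≤ 1 ∧ |(j : Int) - bci| ≤ 1 ∧
          ¬((i : Int) = bri ∧ (j : Int) = bci)) := by
      rw [mem_pvNeighbours]
      constructor
      · rintro ⟨-, -, -, h4, h5, h6, h7⟩
        exact ⟨h4, h5, h6, h7⟩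
      · rintro ⟨h4, h5, h6, h7⟩
        exact ⟨by omega, by omega, by omega, h4, h5, h6, h7⟩
    rw [if_congr hiff rfl rfl]
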